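-- pv_equiv track=rewrite | github.com/gallegodev/batleship_project_py | testing.py | check_boat
-- ===== SOURCE A (Python) =====
-- def check_ok(boat, num_used):
--     """
--     This function checks if number if boat is valid
--     """
--
--     for i in range(len(boat)):
--         num = boat[i]
--         if num in num_used:
--             boat = [-1]
--             break
--         if num < 0 or num > 99:
--             boat = [-1]
--             break
--         elif num % 9 == 0 and i < len(boat) - 1:
--             if boat[i+1] % 10 == 0:
--                 boat = [-1]
--                 break
--
--     return boat
--
-- def check_boat(b, start, direction, num_used):
--     """
--     This Function generates random number for the boat positions
--     """
--
--     boat = []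
--     if direction == 1:
--         for i in range(b):
--             boat.append(start - i*10)
--             boat = check_ok(boat, num_used)
--     elif direction == 2:
--         for i in range(b):
--             boat.append(start + i)
--             boat = check_ok(boat, num_used)
--     elif direction == 3:
--         for i in range(b):
--             boat.append(start + i*10)
--             boat = check_ok(boat, num_used)
--     elif direction == 4:
--         for i in range(b):
--             boat.append(start - i)
--             boat = check_ok(boat, num_used)
--     return boat
-- ===== SOURCE B (Python) =====
-- def check_boat(b, start, direction, num_used):
--     steps = {1: -10, 2: 1, 3: 10, 4: -1}
--     if direction not in steps:
--         return []
--     step = steps[direction]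
--     pos = [start + i * step for i in range(b)]
--     used = set(num_used)
--     ok = all(0 <= p <= 99 and p not in used for p in pos)
--     ok = ok and not any(p % 9 == 0 and q % 10 == 0 for p, q in zip(pos, pos[1:]))
--     return pos if ok else [-1]
-- ===== Notes on version B (the rewrite author's own statement) =====
-- stated objective: simpler
-- what changed: B builds the whole position list from the direction's step in one comprehension and validates it with a single pass (bounds/used-set membership plus one adjacent-pair zip scan), replacing A's re-running of the full check_ok scan after every single append.
import Mathlib
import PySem

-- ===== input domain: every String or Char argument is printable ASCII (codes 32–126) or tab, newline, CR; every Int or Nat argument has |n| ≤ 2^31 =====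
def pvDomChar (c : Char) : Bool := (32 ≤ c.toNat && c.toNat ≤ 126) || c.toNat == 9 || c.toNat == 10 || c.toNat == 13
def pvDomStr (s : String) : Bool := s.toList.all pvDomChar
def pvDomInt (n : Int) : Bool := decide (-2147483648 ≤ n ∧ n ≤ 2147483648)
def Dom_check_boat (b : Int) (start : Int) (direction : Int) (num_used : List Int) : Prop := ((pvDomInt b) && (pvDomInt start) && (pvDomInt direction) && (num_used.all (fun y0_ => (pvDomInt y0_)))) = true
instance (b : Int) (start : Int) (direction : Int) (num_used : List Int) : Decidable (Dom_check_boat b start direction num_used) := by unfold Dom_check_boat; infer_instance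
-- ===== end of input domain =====

-- B builds the whole position list once and validates it in a single pass, instead of
-- A's re-run of the full check_ok scan after every append (objective: simpler).

-- ===== PORT A =====
-- check_ok's 'for i in range(len(boat))' rendered as recursion over the remaining
-- suffix: boat[i+1] is the head of the rest, 'i < len(boat) - 1' is 'rest ≠ []'.
-- Exact: boat is only reassigned immediately before a break, so all reads see the
-- original list and the fixed original range.
def check_ok_go (num_used : List Int) (boat : List Int) : List Int → List Int
  | [] => boat
  | num :: rest =>
    if num_used.contains num then [-1]
    else if num < 0 || num > 99 then [-1]
    else if PySem.Int.mod num 9 == 0 && !rest.isEmpty then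
      if PySem.Int.mod (rest.headD 0) 10 == 0 then [-1]
      else check_ok_go num_used boat rest
    else check_ok_go num_used boat rest

def check_ok (boat : List Int) (num_used : List Int) : List Int :=
  check_ok_go num_used boat boat

def check_boat (b : Int) (start : Int) (direction : Int) (num_used : List Int) : List Int :=
  if direction = 1 then
    (PySem.List.pyRange 0 b 1).foldl (fun boat i => check_ok (boat ++ [start - i * 10]) num_used) []
  else if direction = 2 then
    (PySem.List.pyRange 0 b 1).foldl (fun boat i => check_ok (boat ++ [start + i]) num_used) []
  else if direction = 3 then
    (PySem.List.pyRange 0 b 1).foldl (fun boat i => check_ok (boat ++ [start + i * 10]) num_used) []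
  else if direction = 4 then
    (PySem.List.pyRange 0 b 1).foldl (fun boat i => check_ok (boat ++ [start - i]) num_used) []
  else []

-- ===== PORT B =====
def check_boat_alt (b : Int) (start : Int) (direction : Int) (num_used : List Int) : List Int :=
  let step? : Option Int :=
    if direction = 1 then some (-10) else if direction = 2 then some 1
    else if direction = 3 then some 10 else if direction = 4 then some (-1) else none
  match step? with
  | none => []
  | some step =>
    let pos := (PySem.List.pyRange 0 b 1).map (fun i => start + i * step)
    let used := PySem.Set.ofList num_used
    let ok := pos.all (fun p => decide (0 ≤ p) && decide (p ≤ 99) && !(PySem.Set.contains used p))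
    let ok := ok && !((pos.zip pos.tail).any (fun pq =>
        (PySem.Int.mod pq.1 9 == 0) && (PySem.Int.mod pq.2 10 == 0)))
    if ok then pos else [-1]

-- ===== PRECONDITION & SPEC =====
def Spec_check_boat (b : Int) (start : Int) (direction : Int) (num_used : List Int) (out : List Int) : Prop := out = check_boat_alt b start direction num_used
instance (b : Int) (start : Int) (direction : Int) (num_used : List Int) (out : List Int) : Decidable (Spec_check_boat b start direction num_used out) := by unfold Spec_check_boat; infer_instance

-- ===== CLAIM (what is proved, stated in full; the proofs are below) =====
def Claim_equal_check_boat : Prop := ∀ (b : Int) (start : Int) (direction : Int) (num_used : List Int), Dom_check_boat b start direction num_used → Spec_check_boat b start direction num_used (check_boat b start direction num_used)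

-- ===== LEMMAS AND PROOFS =====

-- 'ok' test of B, per element and for the whole list
def goodElem (num_used : List Int) (p : Int) : Bool :=
  decide (0 ≤ p) && decide (p ≤ 99) && !(num_used.contains p)

def pairBad (pq : Int × Int) : Bool :=
  (PySem.Int.mod pq.1 9 == 0) && (PySem.Int.mod pq.2 10 == 0)

def okList (num_used : List Int) (l : List Int) : Bool :=
  l.all (goodElem num_used) && !((l.zip l.tail).any pairBad)

lemma check_ok_go_char (num_used boat : List Int) (l : List Int) :
    check_ok_go num_used boat l = if okList num_used l then boat else [-1] := by
  induction l with
  | nil => simp [check_ok_go, okList]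
  | cons x rest ih =>
    simp only [check_ok_go]
    by_cases hc : num_used.contains x = true
    · rw [if_pos hc]
      have hm : x ∈ num_used := by simpa using hc
      have hg : goodElem num_used x = false := by simp [goodElem, hm]
      simp [okList, hg]
    · rw [if_neg hc]
      by_cases hb : (decide (x < 0) || decide (x > 99)) = true
      · rw [if_pos hb]
        have hg : goodElem num_used x = false := by
          simp only [Bool.or_eq_true, decide_eq_true_eq] at hb
          rcases hb with h | h
          · simp [goodElem, show ¬(0:Int) ≤ x by omega]
          · simp [goodElem, show ¬x ≤ 99 by omega]
        simp [okList, hg]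
      · rw [if_neg hb]
        simp only [Bool.or_eq_true, decide_eq_true_eq, not_or, not_lt] at hb
        have hm : x ∉ num_used := by simpa using hc
        have hg : goodElem num_used x = true := by
          simp [goodElem, hm]
          omega
        cases rest with
        | nil => simp [okList, check_ok_go, hg]
        | cons y r =>
          have hhd : (y :: r).headD 0 = y := rfl
          have hne : (!(y :: r).isEmpty) = true := rfl
          by_cases h9 : (PySem.Int.mod x 9 == 0) = true
          · rw [if_pos (by simpa using h9)]
            rw [hhd]
            by_cases h10 : (PySem.Int.mod y 10 == 0) = true
            · rw [if_pos h10]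
              have hpb : pairBad (x, y) = true := by simp only [pairBad, h9, h10]; rfl
              simp [okList, hpb]
            · rw [if_neg h10, ih]
              have : okList num_used (x :: y :: r) = okList num_used (y :: r) := by
                have h10' : (PySem.Int.mod y 10 == 0) = false := by simpa using h10
                have hpb : pairBad (x, y) = false := by
                  simp only [pairBad, h10', Bool.and_false]
                simp only [okList, List.all_cons, List.tail_cons, List.zip_cons_cons,
                  List.any_cons, hg, hpb, Bool.true_and, Bool.false_or]
              rw [this]
          · have h9' : (PySem.Int.mod x 9 == 0) = false := by simpa using h9
            rw [if_neg (by simp only [h9', Bool.false_and]; simp), ih]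
            have : okList num_used (x :: y :: r) = okList num_used (y :: r) := by
              have hpb : pairBad (x, y) = false := by
                simp only [pairBad, h9', Bool.false_and]
              simp only [okList, List.all_cons, List.tail_cons, List.zip_cons_cons,
                List.any_cons, hg, hpb, Bool.true_and, Bool.false_or]
            rw [this]

lemma check_ok_char (num_used : List Int) (l : List Int) :
    check_ok l num_used = if okList num_used l then l else [-1] :=
  check_ok_go_char num_used l l

lemma zip_tail_append (l : List Int) (x : Int) :
    (l ++ [x]).zip (l ++ [x]).tail
      = (l.zip l.tail) ++ (match l.getLast? with | none => [] | some y => [(y, x)]) := by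
  induction l with
  | nil => simp
  | cons a l ih =>
    cases l with
    | nil => simp
    | cons b l' =>
      simp only [List.cons_append, List.zip_cons_cons, List.tail_cons] at *
      rw [ih]
      simp [List.getLast?_cons_cons]

lemma okList_append (num_used : List Int) (l : List Int) (x : Int) :
    okList num_used (l ++ [x])
      = (okList num_used l && goodElem num_used x
          && !(match l.getLast? with | none => false | some y => pairBad (y, x))) := by
  unfold okList
  rw [zip_tail_append]
  cases h : l.getLast? <;>
    simp only [List.all_append, List.any_append, List.all_cons, List.all_nil,
      List.any_cons, List.any_nil, Bool.not_or] <;>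
    cases l.all (goodElem num_used) <;> cases goodElem num_used x <;>
    cases (l.zip l.tail).any pairBad <;> simp

lemma okList_neg_one (num_used : List Int) (l : List Int) :
    okList num_used (-1 :: l) = false := by
  simp [okList, goodElem]

-- the loop invariant of A's per-direction fold, over range(lo, lo+n)
lemma fold_char_nat (num_used : List Int) (g : Int → Int) (lo : Int) (n : Nat) :
    (PySem.List.pyRange lo (lo + n) 1).foldl
        (fun boat i => check_ok (boat ++ [g i]) num_used) []
      = (if okList num_used ((PySem.List.pyRange lo (lo + n) 1).map g)
          then (PySem.List.pyRange lo (lo + n) 1).map g else [-1]) := by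
  induction n with
  | zero =>
    rw [show lo + (0:Nat) = lo by omega, PySem.List.pyRange_one_eq_nil le_rfl]
    simp [okList]
  | succ m ih =>
    have hsplit : PySem.List.pyRange lo (lo + (m + 1 : Nat)) 1
        = PySem.List.pyRange lo (lo + m) 1 ++ [lo + m] := by
      rw [show lo + (m + 1 : Nat) = (lo + m) + 1 by push_cast; ring]
      exact PySem.List.pyRange_one_succ_right (by omega)
    rw [hsplit, List.foldl_append, ih]
    simp only [List.foldl_cons, List.foldl_nil, List.map_append, List.map_cons, List.map_nil]
    by_cases hok : okList num_used ((PySem.List.pyRange lo (lo + (m:Int)) 1).map g) = true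
    · rw [if_pos hok, check_ok_char]
    · have hok' : okList num_used ((PySem.List.pyRange lo (lo + (m:Int)) 1).map g) = false := by
        simpa using hok
      rw [hok']
      rw [if_neg (by simp)]
      have hL : check_ok (([-1] : List Int) ++ [g (lo + m)]) num_used = [-1] := by
        rw [check_ok_char]
        rw [if_neg (by simp [okList_neg_one])]
      rw [hL, okList_append, hok']
      rw [if_neg (by simp)]

lemma fold_char (num_used : List Int) (g : Int → Int) (b : Int) :
    (PySem.List.pyRange 0 b 1).foldl
        (fun boat i => check_ok (boat ++ [g i]) num_used) []
      = (if okList num_used ((PySem.List.pyRange 0 b 1).map g)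
          then (PySem.List.pyRange 0 b 1).map g else [-1]) := by
  by_cases hle : b ≤ 0
  · rw [PySem.List.pyRange_one_eq_nil hle]; simp [okList]
  · rw [show b = 0 + ((b.toNat : Int)) by omega]
    exact fold_char_nat num_used g 0 b.toNat

lemma okList_eq_altcond (num_used pos : List Int) :
    (pos.all (fun p => decide (0 ≤ p) && decide (p ≤ 99)
        && !(PySem.Set.contains (PySem.Set.ofList num_used) p))
      && !((pos.zip pos.tail).any (fun pq =>
          (PySem.Int.mod pq.1 9 == 0) && (PySem.Int.mod pq.2 10 == 0))))
      = okList num_used pos := by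
  have hc : ∀ p : Int, PySem.Set.contains (PySem.Set.ofList num_used) p = num_used.contains p := by
    intro p; simp [pysem]
  simp only [hc]
  unfold okList goodElem pairBad
  rfl

-- ===== VERDICT (by name: the statement is the Claim_ definition above) =====
theorem check_boat_spec : Claim_equal_check_boat := by
  intro b start direction num_used _hDom
  unfold Spec_check_boat check_boat check_boat_alt
  by_cases h1 : direction = 1
  · subst h1
    norm_num
    rw [fold_char num_used (fun i => start - i * 10) b,
      show ((PySem.List.pyRange 0 b 1).map (fun i => start - i * 10))
          = ((PySem.List.pyRange 0 b 1).map (fun i => start + i * -10)) from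
        List.map_congr_left (fun i _ => by ring),
      okList_eq_altcond]
    exact if_congr Iff.rfl (List.map_congr_left (fun i _ => by ring)) rfl
  · by_cases h2 : direction = 2
    · subst h2
      norm_num
      rw [fold_char num_used (fun i => start + i) b,
        show ((PySem.List.pyRange 0 b 1).map (fun i => start + i))
            = ((PySem.List.pyRange 0 b 1).map (fun i => start + i * 1)) from
          List.map_congr_left (fun i _ => by ring),
        okList_eq_altcond]
    · by_cases h3 : direction = 3
      · subst h3
        norm_num
        rw [fold_char num_used (fun i => start + i * 10) b, okList_eq_altcond]
      · by_cases h4 : direction = 4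
        · subst h4
          norm_num
          rw [fold_char num_used (fun i => start - i) b,
            show ((PySem.List.pyRange 0 b 1).map (fun i => start - i))
                = ((PySem.List.pyRange 0 b 1).map (fun i => start + i * -1)) from
              List.map_congr_left (fun i _ => by ring),
            okList_eq_altcond]
          exact if_congr Iff.rfl (List.map_congr_left (fun i _ => by ring)) rfl
        · simp [h1, h2, h3, h4]
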